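-- pv_equiv track=rewrite | github.com/GandhiAndrianarivony/Memoire-Combinatoire-v2 | combi.py | is_321
-- ===== SOURCE A (Python) =====
-- def is_321(sigma):
--     pivot = sigma[0]
--     pivot_index = 0
--     sigma_len = len(sigma)
--
--     while pivot_index < sigma_len - 1:
--         for i in range(pivot_index + 1, sigma_len - 1):
--             if i + 1 == sigma_len-1:
--                 if pivot > sigma[i] > sigma[i+1]:
--                     return True
--
--             for j in range(i + 1, sigma_len):
--                 if pivot > sigma[i] > sigma[j]:
--                     return True
--
--         pivot = get_pivot(pivot, sigma)
--
--         if not pivot: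
--             return False
--
--         pivot_index = sigma.index(pivot)
--
--     return False
--
-- def get_pivot(actual, data):
--     actual_pivot_index = data.index(actual)
--     if actual_pivot_index < len(data) - 1:
--         for idx in range(actual_pivot_index + 1, len(data)):
--             if data[idx] > actual:
--                 return data[idx]
-- ===== SOURCE B (Python) =====
-- def is_321(sigma):
--     # suffix minima: suf[t] = min(sigma[t:]), built back to front in one pass
--     suf = []
--     for x in reversed(sigma):
--         suf.append(min(x, suf[-1]) if suf else x)
--     suf.reverse()
--     best = None  # max of the elements seen so far
--     for j, x in enumerate(sigma):
--         if best is not None and j + 1 < len(sigma) and best > x > suf[j + 1]: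
--             return True
--         if best is None or x > best:
--             best = x
--     return False
-- ===== Notes on version B (the rewrite author's own statement) =====
-- stated objective: faster
-- what changed: Replaced A's repeated O(n^2) pair scans driven by a pivot chain (prefix maxima found via list.index) with a single O(n) pass that keeps a running prefix maximum and a precomputed suffix-minimum array.
-- intended difference: On lists that start with one or more negatives immediately followed by a zero, and whose every 321 pattern starts at or after that zero, A returns False (its 'if not pivot' test treats the pivot value zero as a missing pivot and aborts), while B returns True, which is the intended answer since a 321 pattern exists. — e.g. on is_321([-1, 0, 3, 2, 1]): A returns false, B returns true
-- outside the precondition, e.g. on is_321([]): A raises IndexError, B returns False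
import Mathlib
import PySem

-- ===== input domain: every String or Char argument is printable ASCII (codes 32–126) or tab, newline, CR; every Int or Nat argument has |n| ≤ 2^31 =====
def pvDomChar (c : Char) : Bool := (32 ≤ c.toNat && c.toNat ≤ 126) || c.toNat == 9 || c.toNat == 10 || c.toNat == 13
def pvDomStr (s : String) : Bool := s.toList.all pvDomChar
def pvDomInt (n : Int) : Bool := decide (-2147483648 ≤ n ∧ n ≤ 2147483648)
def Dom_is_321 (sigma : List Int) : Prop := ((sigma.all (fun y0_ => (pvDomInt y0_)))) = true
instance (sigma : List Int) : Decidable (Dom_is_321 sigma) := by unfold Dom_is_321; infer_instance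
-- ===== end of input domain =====

-- B replaces A's O(n^3) pivot-chain pair scans by one O(n) pass (running prefix max + suffix minima).
-- A's 'if not pivot' treats pivot value 0 like None: on the D_ inputs A returns False though a 321
-- pattern exists; B returns True there (stated as the intended difference).

-- ===== PORT A =====
-- inner 'for idx' loop of get_pivot: first element of the remaining list greater than actual
def firstGreater (actual : Int) : List Int → Option Int
  | [] => none
  | x :: xs => if actual < x then some x else firstGreater actual xs

def get_pivot (actual : Int) (data : List Int) : Option Int :=
  match PySem.List.index? data actual with
  | none => none      -- Python data.index would raise ValueError; unreachable (A only passes values of data)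
  | some api =>
    if (api : Int) < (data.length : Int) - 1 then
      firstGreater actual (data.drop (api + 1))
    else none

-- the two nested 'for' loops of one while-iteration (early return True = any)
def scanFound (sigma : List Int) (pivot pivotIndex n : Int) : Bool :=
  (PySem.List.pyRange (pivotIndex + 1) (n - 1) 1).any (fun i =>
    ((if i + 1 = n - 1 then
        decide ((PySem.List.pyGet? sigma i).getD 0 < pivot ∧
                (PySem.List.pyGet? sigma (i + 1)).getD 0 < (PySem.List.pyGet? sigma i).getD 0)
      else false)
     ||
     (PySem.List.pyRange (i + 1) n 1).any (fun j =>
        decide ((PySem.List.pyGet? sigma i).getD 0 < pivot ∧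
                (PySem.List.pyGet? sigma j).getD 0 < (PySem.List.pyGet? sigma i).getD 0))))
-- indices produced by range are always in range, so the .getD 0 default is never used

-- the while loop; fuel only makes it total: pivot_index strictly increases each iteration,
-- so length + 1 iterations can never be reached (see loopA_spec below)
def loopA : Nat → List Int → Int → Int → Bool
  | 0, _, _, _ => false
  | fuel + 1, sigma, pivot, pivotIndex =>
    if pivotIndex < (sigma.length : Int) - 1 then
      if scanFound sigma pivot pivotIndex (sigma.length : Int) then true
      else
        match get_pivot pivot sigma with
        | none => false
        | some p =>
          if p = 0 then false       -- Python: 'if not pivot' is true for None and for 0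
          else
            match PySem.List.index? sigma p with
            | none => false         -- unreachable: p is an element of sigma
            | some pi => loopA fuel sigma p (pi : Int)
    else false

def is_321 (sigma : List Int) : Bool :=
  match PySem.List.pyGet? sigma 0 with
  | none => false                   -- Python raises IndexError on []; excluded by Pre_
  | some p => loopA (sigma.length + 1) sigma p 0

-- ===== PORT B =====
-- suffix minima, built back to front: head of sufMins l is min of l
def sufMins : List Int → List Int
  | [] => []
  | x :: xs =>
    match sufMins xs with
    | [] => [x]
    | m :: t => min x m :: m :: t

-- the single forward pass: best = max of elements already seen (none at the start)
def scan321 : Option Int → List Int → List Int → Bool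
  | _, [], _ => false
  | best, x :: xs, suf =>
    let suf' := suf.tail
    if (match best, suf'.head? with
        | some b, some m => decide (x < b ∧ m < x)
        | _, _ => false) then true
    else scan321 (match best with
                  | none => some x
                  | some b => if b < x then some x else some b) xs suf'

def is_321_alt (sigma : List Int) : Bool := scan321 none sigma (sufMins sigma)

-- ===== PRECONDITION & SPEC =====
-- Pre_ excludes only the empty list, on which A raises IndexError at sigma[0]
def Pre_is_321 (sigma : List Int) : Prop := sigma ≠ []
instance (sigma : List Int) : Decidable (Pre_is_321 sigma) := by unfold Pre_is_321; infer_instance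
def pvWitness_is_321 : List Int := [3, 2, 1]


-- helper predicates used by D_ (closed-form, on the input only)
-- pat3 s e: some 321 pattern starts at index e
def pat3 (s : List Int) (e : Nat) : Prop :=
  ∃ k < s.length, ∃ j < k, e < j ∧ s.getD j 0 < s.getD e 0 ∧ s.getD k 0 < s.getD j 0
-- negLen s: length of the leading run of negative elements
def negLen (s : List Int) : Nat := (s.takeWhile (· < 0)).length

-- On lists that start with one or more negatives immediately followed by a zero, and whose every
-- 321 pattern starts at or after that zero, A returns False ('if not pivot' treats the pivot value
-- zero as a missing pivot and aborts) while B returns True, the intended answer (a pattern exists).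
def D_is_321 (sigma : List Int) : Prop :=
  0 < negLen sigma ∧ sigma[negLen sigma]? = some 0 ∧
  (∃ e < sigma.length, pat3 sigma e) ∧ ¬ ∃ e < negLen sigma, pat3 sigma e
instance (sigma : List Int) : Decidable (D_is_321 sigma) := by
  unfold D_is_321 pat3 negLen; infer_instance

def Spec_is_321 (sigma : List Int) (out : Bool) : Prop := ¬ D_is_321 sigma → out = is_321_alt sigma
instance (sigma : List Int) (out : Bool) : Decidable (Spec_is_321 sigma out) := by unfold Spec_is_321; infer_instance

def pvDiffWitness_is_321 : List Int := [-1, 0, 3, 2, 1]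
def pvDiffWitnessOut_is_321 : Bool × Bool := (false, true)

-- ===== CLAIM (what is proved, stated in full; the proofs are below) =====
def Claim_unchanged_is_321 : Prop := ∀ (sigma : List Int), Dom_is_321 sigma → Pre_is_321 sigma → Spec_is_321 sigma (is_321 sigma)
def Claim_changed_is_321 : Prop := Dom_is_321 (pvDiffWitness_is_321) ∧ Pre_is_321 (pvDiffWitness_is_321) ∧ D_is_321 (pvDiffWitness_is_321) ∧ is_321 (pvDiffWitness_is_321) = pvDiffWitnessOut_is_321.1 ∧ is_321_alt (pvDiffWitness_is_321) = pvDiffWitnessOut_is_321.2 ∧ pvDiffWitnessOut_is_321.1 ≠ pvDiffWitnessOut_is_321.2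
def Claim_exact_is_321 : Prop := ∀ (sigma : List Int), Dom_is_321 sigma → Pre_is_321 sigma → D_is_321 sigma → is_321 sigma ≠ is_321_alt sigma

-- ===== LEMMAS AND PROOFS =====

def gd (l : List Int) (i : Nat) : Int := l.getD i 0

-- hasPat: a 321 pattern exists (D_'s third conjunct)
def hasPat (sigma : List Int) : Prop := ∃ e < sigma.length, pat3 sigma e


-- strict prefix maximum at index e (exactly the pivot values A's chain visits)
def SPMax (sigma : List Int) (e : Nat) : Prop :=
  e < sigma.length ∧ ∀ t, t < e → gd sigma t < gd sigma e

-- loop invariant: pivot sits (first occurrence) at pivot_index and dominates everything before it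
def InvA (sigma : List Int) (pivot : Int) (pi : Nat) : Prop :=
  pi < sigma.length ∧ gd sigma pi = pivot ∧ ∀ t, t < pi → gd sigma t < pivot

-- what A's while loop computes from state (pivot, pi): a pattern led by a strict prefix
-- maximum e ≥ pi that the chain reaches before hitting the pivot value 0
def SpecFrom (sigma : List Int) (pi : Nat) : Prop :=
  ∃ e, pi ≤ e ∧ SPMax sigma e ∧
    (∀ m, pi < m → m ≤ e → gd sigma m = 0 → ¬ SPMax sigma m) ∧
    ∃ j, e < j ∧ ∃ k, j < k ∧ k < sigma.length ∧ gd sigma j < gd sigma e ∧ gd sigma k < gd sigma j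


theorem gd_eq_getElem {sigma : List Int} {t : Nat} (h : t < sigma.length) :
    gd sigma t = sigma[t] := by
  simp [gd, List.getD, List.getElem?_eq_getElem h]

theorem firstGreater_none {a : Int} {l : List Int} (h : firstGreater a l = none) :
    ∀ x ∈ l, ¬ a < x := by
  induction l with
  | nil => simp
  | cons y ys ih =>
    intro x hx
    unfold firstGreater at h
    split at h
    · exact absurd h (by simp)
    · rcases List.mem_cons.1 hx with rfl | hx
      · assumption
      · exact ih h x hx

theorem firstGreater_some {a x : Int} {l : List Int} (h : firstGreater a l = some x) :
    ∃ q, ∃ hq : q < l.length, l[q] = x ∧ a < x ∧ ∀ t (ht : t < q), ¬ a < l[t] := by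
  induction l with
  | nil => simp [firstGreater] at h
  | cons y ys ih =>
    unfold firstGreater at h
    split at h
    · rename_i hy
      refine ⟨0, by simp, by simpa using h, ?_, by omega⟩
      cases h; exact hy
    · rename_i hy
      obtain ⟨q, hq, hval, hgt, hmin⟩ := ih h
      refine ⟨q + 1, by simpa using Nat.succ_lt_succ hq, by simpa using hval, hgt, ?_⟩
      intro t ht
      cases t with
      | zero => simpa using hy
      | succ t => simpa using hmin t (by omega)

theorem gd_pyGet (sigma : List Int) (i : Int) (h : 0 ≤ i) :
    (PySem.List.pyGet? sigma i).getD 0 = gd sigma i.toNat := by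
  rw [PySem.List.pyGet?_of_nonneg sigma h]
  simp [gd, List.getD]

theorem scanFound_iff (sigma : List Int) (pivot : Int) (pi : Nat) :
    scanFound sigma pivot (pi : Int) (sigma.length : Int) = true ↔
      ∃ j, pi < j ∧ ∃ k, j < k ∧ k < sigma.length ∧
        gd sigma j < pivot ∧ gd sigma k < gd sigma j := by
  unfold scanFound
  rw [List.any_eq_true]
  constructor
  · rintro ⟨i, hi, hb⟩
    rw [PySem.List.mem_pyRange_one] at hi
    have hi0 : 0 ≤ i := by omega
    rcases Bool.or_eq_true_iff.1 hb with hsp | hinner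
    · split at hsp
      · rename_i hlast
        simp only [decide_eq_true_eq] at hsp
        rw [gd_pyGet _ _ hi0, gd_pyGet _ _ (by omega)] at hsp
        refine ⟨i.toNat, by omega, i.toNat + 1, by omega, by omega, hsp.1, ?_⟩
        have : (i + 1).toNat = i.toNat + 1 := by omega
        rw [this] at hsp
        exact hsp.2
      · simp at hsp
    · rw [List.any_eq_true] at hinner
      obtain ⟨j, hj, hcond⟩ := hinner
      rw [PySem.List.mem_pyRange_one] at hj
      simp only [decide_eq_true_eq] at hcond
      rw [gd_pyGet _ _ hi0, gd_pyGet _ _ (by omega)] at hcond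
      exact ⟨i.toNat, by omega, j.toNat, by omega, by omega, hcond.1, hcond.2⟩
  · rintro ⟨j, hpj, k, hjk, hk, hjp, hkj⟩
    refine ⟨(j : Int), PySem.List.mem_pyRange_one.2 (by omega), ?_⟩
    apply Bool.or_eq_true_iff.2
    right
    rw [List.any_eq_true]
    refine ⟨(k : Int), PySem.List.mem_pyRange_one.2 (by omega), ?_⟩
    simp only [decide_eq_true_eq]
    rw [gd_pyGet _ _ (by positivity), gd_pyGet _ _ (by positivity)]
    simpa using ⟨hjp, hkj⟩

theorem index?_of_inv {sigma : List Int} {pivot : Int} {pi : Nat} (h : InvA sigma pivot pi) :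
    PySem.List.index? sigma pivot = some pi := by
  obtain ⟨hlen, hval, hlt⟩ := h
  rw [PySem.List.index?_eq_some_iff]
  refine ⟨sigma.take pi, sigma.drop (pi + 1), ?_, by simp [hlen.le], ?_⟩
  · conv_lhs => rw [← List.take_append_drop pi sigma]
    congr 1
    rw [List.drop_eq_getElem_cons hlen]
    rw [← gd_eq_getElem hlen, hval]
  · intro hmem
    obtain ⟨t, ht, htv⟩ := List.mem_iff_getElem.1 hmem
    have ht' : t < pi := by simpa [hlen.le] using ht
    have : sigma[t]'(by omega) = pivot := by
      simpa [List.getElem_take] using htv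
    have := hlt t ht'
    rw [gd_eq_getElem (by omega)] at this
    omega

theorem spmax_of_inv {sigma : List Int} {pivot : Int} {pi : Nat} (h : InvA sigma pivot pi) :
    SPMax sigma pi :=
  ⟨h.1, fun t ht => h.2.1 ▸ h.2.2 t ht⟩

theorem get_pivot_none {sigma : List Int} {pivot : Int} {pi : Nat} (h : InvA sigma pivot pi)
    (hg : get_pivot pivot sigma = none) :
    ∀ e, pi < e → ¬ SPMax sigma e := by
  intro e hpe hsp
  obtain ⟨he, hmax⟩ := hsp
  obtain ⟨hlen, hval, hlt⟩ := h
  have hge : get_pivot pivot sigma =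
      (if (pi : Int) < (sigma.length : Int) - 1 then
        firstGreater pivot (sigma.drop (pi + 1)) else none) := by
    unfold get_pivot
    rw [index?_of_inv ⟨hlen, hval, hlt⟩]
  rw [hge] at hg
  split at hg
  · -- firstGreater returned none: everything after pi is at most pivot
    have hgt : pivot < gd sigma e := hval ▸ hmax pi hpe
    have hmem : gd sigma e ∈ sigma.drop (pi + 1) := by
      rw [gd_eq_getElem he]
      exact List.mem_iff_getElem.2 ⟨e - (pi + 1), by simp; omega,
        by rw [List.getElem_drop]; congr 1; omega⟩
    exact firstGreater_none hg _ hmem hgt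
  · rename_i hcond
    omega

theorem get_pivot_some {sigma : List Int} {pivot p : Int} {pi : Nat} (h : InvA sigma pivot pi)
    (hg : get_pivot pivot sigma = some p) :
    ∃ q, PySem.List.index? sigma p = some q ∧ pi < q ∧ InvA sigma p q ∧
      (∀ e, pi < e → e < q → ¬ SPMax sigma e) := by
  obtain ⟨hlen, hval, hlt⟩ := h
  have hge : get_pivot pivot sigma =
      (if (pi : Int) < (sigma.length : Int) - 1 then
        firstGreater pivot (sigma.drop (pi + 1)) else none) := by
    unfold get_pivot
    rw [index?_of_inv ⟨hlen, hval, hlt⟩]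
  rw [hge] at hg
  split at hg
  · rename_i hcond
    obtain ⟨q', hq', hqval, hpgt, hmin⟩ := firstGreater_some hg
    have hq'len : pi + 1 + q' < sigma.length := by
      have := hq'
      simp [List.length_drop] at this
      omega
    have hgetq : gd sigma (pi + 1 + q') = p := by
      rw [gd_eq_getElem hq'len, ← hqval, List.getElem_drop]
    have hbetween : ∀ t, pi < t → t < pi + 1 + q' → gd sigma t ≤ pivot := by
      intro t ht1 ht2
      have := hmin (t - (pi + 1)) (by omega)
      rw [List.getElem_drop] at this
      have heq : pi + 1 + (t - (pi + 1)) = t := by omega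
      rw [← gd_eq_getElem (by omega)] at this
      rw [heq] at this
      omega
    have hinv : InvA sigma p (pi + 1 + q') := by
      refine ⟨hq'len, hgetq, ?_⟩
      intro t ht
      rcases lt_trichotomy t pi with h' | rfl | h'
      · exact lt_trans (hlt t h') hpgt
      · omega
      · exact lt_of_le_of_lt (hbetween t h' ht) hpgt
    refine ⟨pi + 1 + q', index?_of_inv hinv, by omega, hinv, ?_⟩
    intro e he1 he2 hsp
    obtain ⟨helen, hmax⟩ := hsp
    have h1 := hmax pi he1
    rw [hval] at h1
    have h2 := hbetween e he1 he2
    omega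
  · exact absurd hg (by simp)

theorem loopA_spec (fuel : Nat) : ∀ (sigma : List Int) (pivot : Int) (pi : Nat),
    InvA sigma pivot pi → sigma.length ≤ fuel + pi →
    (loopA fuel sigma pivot (pi : Int) = true ↔ SpecFrom sigma pi) := by
  induction fuel with
  | zero =>
    intro sigma pivot pi hinv hle
    exact absurd hinv.1 (by omega)
  | succ fuel ih =>
    intro sigma pivot pi hinv hle
    rw [loopA]
    by_cases hcond : (pi : Int) < (sigma.length : Int) - 1
    · rw [if_pos hcond]
      by_cases hscan : scanFound sigma pivot (pi : Int) (sigma.length : Int) = true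
      · rw [if_pos hscan]
        simp only [true_iff]
        obtain ⟨j, hpj, k, hjk, hk, hjp, hkj⟩ := (scanFound_iff sigma pivot pi).1 hscan
        exact ⟨pi, le_refl _, spmax_of_inv hinv, fun m h1 h2 _ _ => by omega,
          j, hpj, k, hjk, hk, by rw [gd_eq_getElem hinv.1, ← gd_eq_getElem hinv.1, hinv.2.1]; exact hjp, hkj⟩
      · rw [if_neg hscan]
        have noScan : ∀ j k, pi < j → j < k → k < sigma.length →
            gd sigma j < pivot → gd sigma k < gd sigma j → False := by
          intro j k h1 h2 h3 h4 h5
          exact hscan ((scanFound_iff sigma pivot pi).2 ⟨j, h1, k, h2, h3, h4, h5⟩)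
        rcases hgp : get_pivot pivot sigma with _ | p
        · simp only [Bool.false_eq_true, false_iff]
          rintro ⟨e, hpe, hsp, hnostop, j, hej, k, hjk, hk, hje, hkj⟩
          rcases Nat.lt_or_ge pi e with h' | h'
          · exact get_pivot_none hinv hgp e h' hsp
          · have he : e = pi := by omega
            subst he
            exact noScan j k hej hjk hk (by rw [← hinv.2.1, gd_eq_getElem hinv.1, ← gd_eq_getElem hinv.1]; exact hje) hkj
        · obtain ⟨q, hidx, hpiq, hinvq, hnosp⟩ := get_pivot_some hinv hgp
          show (if p = 0 then false
                else match PySem.List.index? sigma p with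
                     | none => false
                     | some pi => loopA fuel sigma p (pi : Int)) = true ↔ SpecFrom sigma pi
          by_cases hp0 : p = 0
          · subst hp0
            rw [if_pos rfl]
            simp only [Bool.false_eq_true, false_iff]
            rintro ⟨e, hpe, hsp, hnostop, j, hej, k, hjk, hk, hje, hkj⟩
            rcases Nat.lt_or_ge pi e with h' | h'
            · have heq : q ≤ e := by
                by_contra hlt
                exact hnosp e h' (by omega) hsp
              exact hnostop q hpiq heq hinvq.2.1 (spmax_of_inv hinvq)
            · have he : e = pi := by omega
              subst he
              exact noScan j k hej hjk hk (by rw [← hinv.2.1, gd_eq_getElem hinv.1, ← gd_eq_getElem hinv.1]; exact hje) hkj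
          · rw [if_neg hp0, hidx]
            show loopA fuel sigma p (q : Int) = true ↔ SpecFrom sigma pi
            rw [ih sigma p q hinvq (by omega)]
            constructor
            · rintro ⟨e, hqe, hsp, hnostop, j, hej, k, hjk, hk, hje, hkj⟩
              refine ⟨e, by omega, hsp, ?_, j, hej, k, hjk, hk, hje, hkj⟩
              intro m h1 h2 h0 hspm
              rcases Nat.lt_trichotomy m q with h' | rfl | h'
              · exact hnosp m h1 h' hspm
              · exact hp0 (by rw [← hinvq.2.1, h0])
              · exact hnostop m h' h2 h0 hspm
            · rintro ⟨e, hpe, hsp, hnostop, j, hej, k, hjk, hk, hje, hkj⟩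
              rcases Nat.lt_or_ge pi e with h' | h'
              · have hqe : q ≤ e := by
                  by_contra hlt
                  exact hnosp e h' (by omega) hsp
                refine ⟨e, hqe, hsp, ?_, j, hej, k, hjk, hk, hje, hkj⟩
                intro m h1 h2 h0 hspm
                exact hnostop m (by omega) h2 h0 hspm
              · have he : e = pi := by omega
                subst he
                exact absurd (noScan j k hej hjk hk (by rw [← hinv.2.1, gd_eq_getElem hinv.1, ← gd_eq_getElem hinv.1]; exact hje) hkj) (by simp)
    · rw [if_neg hcond]
      simp only [Bool.false_eq_true, false_iff]
      rintro ⟨e, hpe, hsp, hnostop, j, hej, k, hjk, hk, hje, hkj⟩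
      have := hsp.1
      omega

theorem is_321_iff {sigma : List Int} (h : sigma ≠ []) :
    is_321 sigma = true ↔ SpecFrom sigma 0 := by
  have hlen : 0 < sigma.length := List.length_pos_iff.2 h
  have hget : PySem.List.pyGet? sigma 0 = some (gd sigma 0) := by
    rw [PySem.List.pyGet?_zero, List.getElem?_eq_getElem hlen, gd_eq_getElem hlen]
  unfold is_321
  rw [hget]
  exact loopA_spec (sigma.length + 1) sigma (gd sigma 0) 0
    ⟨hlen, rfl, by omega⟩ (by omega)

-- ---- B side ----

theorem sufMins_cons (x : Int) (xs : List Int) :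
    sufMins (x :: xs) = match sufMins xs with
      | [] => [x]
      | m :: t => min x m :: m :: t := rfl

theorem sufMins_tail (x : Int) (xs : List Int) : (sufMins (x :: xs)).tail = sufMins xs := by
  rw [sufMins_cons]
  rcases h : sufMins xs with _ | ⟨m, t⟩ <;> simp

theorem sufMins_head {xs : List Int} (h : xs ≠ []) :
    ∃ m, (sufMins xs).head? = some m ∧ m ∈ xs ∧ ∀ y ∈ xs, m ≤ y := by
  induction xs with
  | nil => simp at h
  | cons x ys ih =>
    by_cases hy : ys = []
    · subst hy; exact ⟨x, by simp [sufMins], by simp, by simp⟩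
    · obtain ⟨m, hm, hmem, hle⟩ := ih hy
      rw [sufMins_cons]
      rcases hs : sufMins ys with _ | ⟨m', t⟩
      · rw [hs] at hm; simp at hm
      · rw [hs] at hm; simp at hm; subst hm
        refine ⟨min x m', by simp, ?_, ?_⟩
        · rcases le_total x m' with hxm | hxm
          · simp [min_eq_left hxm]
          · simp [min_eq_right hxm]; right; exact hmem
        · intro y hy'
          rcases List.mem_cons.1 hy' with rfl | hy'
          · exact min_le_left _ _
          · exact le_trans (min_le_right _ _) (hle y hy')

theorem sufMins_nil_iff (xs : List Int) : sufMins xs = [] ↔ xs = [] := by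
  cases xs with
  | nil => simp [sufMins]
  | cons x ys =>
    rw [sufMins_cons]
    rcases sufMins ys with _ | ⟨m, t⟩ <;> simp

theorem scan321_cons (best : Option Int) (x : Int) (xs suf : List Int) :
    scan321 best (x :: xs) suf =
      (if (match best, suf.tail.head? with
           | some b, some m => decide (x < b ∧ m < x)
           | _, _ => false) then true
       else scan321 (match best with
                     | none => some x
                     | some b => if b < x then some x else some b) xs suf.tail) := rfl

theorem scan321_some_iff : ∀ (l : List Int) (b : Int),
    scan321 (some b) l (sufMins l) = true ↔
      ∃ j, j < l.length ∧ (gd l j < b ∨ ∃ e, e < j ∧ gd l j < gd l e) ∧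
        ∃ k, j < k ∧ k < l.length ∧ gd l k < gd l j := by
  intro l
  induction l with
  | nil => intro b; simp [scan321]
  | cons x xs ih =>
    intro b
    rw [scan321_cons, sufMins_tail]
    have hmax : (if b < x then x else b) = max b x := by
      rcases le_or_gt x b with h | h
      · simp [max_eq_left h, if_neg (not_lt.2 h)]
      · simp [max_eq_right (le_of_lt h), if_pos h]
    have hshift : (∃ j, j < (x :: xs).length ∧
        (gd (x :: xs) j < b ∨ ∃ e, e < j ∧ gd (x :: xs) j < gd (x :: xs) e) ∧
        ∃ k, j < k ∧ k < (x :: xs).length ∧ gd (x :: xs) k < gd (x :: xs) j)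
        ↔ ((x < b ∧ ∃ k', k' < xs.length ∧ gd xs k' < x) ∨
           (∃ j, j < xs.length ∧ (gd xs j < max b x ∨ ∃ e, e < j ∧ gd xs j < gd xs e) ∧
             ∃ k, j < k ∧ k < xs.length ∧ gd xs k < gd xs j)) := by
      constructor
      · rintro ⟨j, hj, hpiv, k, hjk, hk, hkj⟩
        cases j with
        | zero =>
          left
          cases k with
          | zero => omega
          | succ k' =>
            have hb : x < b := by
              rcases hpiv with hb | ⟨e, he, _⟩
              · simpa [gd] using hb
              · omega
            exact ⟨hb, k', by simpa using hk, by simpa [gd] using hkj⟩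
        | succ j' =>
          right
          cases k with
          | zero => omega
          | succ k' =>
            refine ⟨j', by simpa using hj, ?_, k', by omega, by simpa using hk,
              by simpa [gd] using hkj⟩
            rcases hpiv with hb | ⟨e, he, hev⟩
            · exact Or.inl (lt_of_lt_of_le (by simpa [gd] using hb) (le_max_left _ _))
            · cases e with
              | zero => exact Or.inl (lt_of_lt_of_le (by simpa [gd] using hev) (le_max_right _ _))
              | succ e' => exact Or.inr ⟨e', by omega, by simpa [gd] using hev⟩
      · rintro (⟨hb, k', hk', hkv⟩ | ⟨j, hj, hpiv, k, hjk, hk, hkj⟩)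
        · exact ⟨0, by simp, Or.inl (by simpa [gd] using hb), k' + 1, by omega,
            by simpa using Nat.succ_lt_succ hk', by simpa [gd] using hkv⟩
        · refine ⟨j + 1, by simpa using Nat.succ_lt_succ hj, ?_, k + 1, by omega,
            by simpa using Nat.succ_lt_succ hk, by simpa [gd] using hkj⟩
          rcases hpiv with hb | ⟨e, he, hev⟩
          · rcases lt_or_ge (gd xs j) b with h' | h'
            · exact Or.inl (by simpa [gd] using h')
            · have : gd xs j < x := by
                rcases max_cases b x with ⟨hm, _⟩ | ⟨hm, _⟩ <;> omega
              exact Or.inr ⟨0, by omega, by simpa [gd] using this⟩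
          · exact Or.inr ⟨e + 1, by omega, by simpa [gd] using hev⟩
    rw [hshift]
    rcases hs : (sufMins xs).head? with _ | m
    · have hxs : xs = [] := (sufMins_nil_iff xs).1 (List.head?_eq_none_iff.1 hs)
      subst hxs
      simp [scan321]
    · have hxs : xs ≠ [] := by
        intro hh; subst hh; simp [sufMins] at hs
      obtain ⟨m2, hm2, hmem, hle⟩ := sufMins_head hxs
      rw [hs] at hm2; injection hm2 with hm2; subst hm2
      by_cases hc : x < b ∧ m < x
      · rw [if_pos (show decide (x < b ∧ m < x) = true by simp [hc.1, hc.2])]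
        simp only [true_iff]
        left
        obtain ⟨k', hk', hkv⟩ := List.mem_iff_getElem.1 hmem
        exact ⟨hc.1, k', hk', by simp [gd, List.getD, List.getElem?_eq_getElem hk', hkv, hc.2]⟩
      · rw [if_neg (show ¬ decide (x < b ∧ m < x) = true by simpa using hc)]
        have hpush : (match (some b : Option Int) with
            | none => some x
            | some b => if b < x then some x else some b) = some (max b x) := by
          show (if b < x then some x else some b) = some (max b x)
          rw [← hmax]; split <;> rfl
        rw [hpush, ih (max b x)]
        constructor
        · intro h; exact Or.inr h
        · rintro (⟨hb, k', hk', hkv⟩ | h)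
          · exfalso
            apply hc
            refine ⟨hb, lt_of_le_of_lt ?_ hkv⟩
            have hkl : k' < xs.length := hk'
            have := hle (xs[k']'hkl) (by simp)
            simpa [gd, List.getD, List.getElem?_eq_getElem hkl] using this
          · exact h

theorem is_321_alt_iff (sigma : List Int) : is_321_alt sigma = true ↔ hasPat sigma := by
  cases sigma with
  | nil => simp [is_321_alt, scan321, hasPat]
  | cons x xs =>
    have hstep : is_321_alt (x :: xs) = scan321 (some x) xs (sufMins xs) := by
      show scan321 none (x :: xs) (sufMins (x :: xs)) = _
      rw [scan321_cons, sufMins_tail]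
      simp
    rw [hstep, scan321_some_iff]
    constructor
    · rintro ⟨j, hj, hpiv, k, hjk, hk, hkj⟩
      rcases hpiv with hb | ⟨e, he, hev⟩
      · exact ⟨0, by simp, k + 1, by simp; omega, j + 1, by omega, by omega,
          by simpa [gd] using hb, by simpa [gd] using hkj⟩
      · exact ⟨e + 1, by simp; omega, k + 1, by simp; omega, j + 1, by omega, by omega,
          by simpa [gd] using hev, by simpa [gd] using hkj⟩
    · rintro ⟨e, he, k, hkl, j, hjk, hej, hje, hkj⟩
      cases j with
      | zero => omega
      | succ j' =>
        cases k with
        | zero => omega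
        | succ k' =>
          refine ⟨j', by simp at hkl ⊢; omega, ?_, k', by omega, by simpa using hkl,
            by simpa [gd] using hkj⟩
          cases e with
          | zero => exact Or.inl (by simpa [gd] using hje)
          | succ e' => exact Or.inr ⟨e', by omega, by simpa [gd] using hje⟩

-- ---- bridges ----

theorem argmax_prefix (sigma : List Int) : ∀ (e : Nat), e < sigma.length →
    ∃ e', e' ≤ e ∧ SPMax sigma e' ∧ gd sigma e ≤ gd sigma e' := by
  intro e
  induction e using Nat.strong_induction_on with
  | _ e ih =>
    intro he
    by_cases hsp : SPMax sigma e
    · exact ⟨e, le_refl _, hsp, le_refl _⟩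
    · have : ∃ t, t < e ∧ gd sigma e ≤ gd sigma t := by
        by_contra hcon
        push_neg at hcon
        exact hsp ⟨he, fun t ht => hcon t ht⟩
      obtain ⟨t, ht, hte⟩ := this
      obtain ⟨e', he1, he2, he3⟩ := ih t ht (by omega)
      exact ⟨e', by omega, he2, le_trans hte he3⟩

theorem negLen_le (sigma : List Int) : negLen sigma ≤ sigma.length :=
  (List.takeWhile_prefix _).length_le

theorem gd_neg_of_lt_negLen {sigma : List Int} {t : Nat} (ht : t < negLen sigma) :
    gd sigma t < 0 := by
  have hpre := List.takeWhile_prefix (l := sigma) (p := fun x => decide (x < 0))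
  have htl : t < sigma.length := lt_of_lt_of_le ht (negLen_le sigma)
  have hmem : (sigma.takeWhile (fun x => decide (x < 0)))[t]'ht ∈
      sigma.takeWhile (fun x => decide (x < 0)) := List.getElem_mem ht
  have := List.mem_takeWhile_imp hmem
  simp only [decide_eq_true_eq] at this
  rw [List.IsPrefix.getElem hpre] at this
  rw [gd_eq_getElem htl]
  exact this

theorem not_neg_at_negLen (sigma : List Int) (h : negLen sigma < sigma.length) :
    ¬ gd sigma (negLen sigma) < 0 := by
  induction sigma with
  | nil => simp at h
  | cons x xs ih =>
    by_cases hx : x < 0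
    · have hL : negLen (x :: xs) = negLen xs + 1 := by
        simp [negLen, List.takeWhile_cons, hx]
      rw [hL]
      rw [hL] at h
      intro hc
      exact ih (by simpa using h) (by simpa [gd] using hc)
    · have hL : negLen (x :: xs) = 0 := by
        simp [negLen, List.takeWhile_cons, hx]
      rw [hL]
      simpa [gd] using hx

theorem negLen_eq_of_zero_spmax {sigma : List Int} {m : Nat} (hm1 : 1 ≤ m)
    (hmlen : m < sigma.length) (hm0 : gd sigma m = 0)
    (hneg : ∀ t, t < m → gd sigma t < 0) : negLen sigma = m := by
  rcases Nat.lt_trichotomy (negLen sigma) m with h | h | h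
  · exact absurd (hneg _ h) (not_neg_at_negLen sigma (by omega))
  · exact h
  · have := gd_neg_of_lt_negLen (t := m) h
    omega

theorem specFrom_iff_hasPat {sigma : List Int} (hnd : ¬ D_is_321 sigma) :
    SpecFrom sigma 0 ↔ hasPat sigma := by
  constructor
  · rintro ⟨e, _, hsp, _, j, hej, k, hjk, hk, hje, hkj⟩
    exact ⟨e, by omega, k, hk, j, hjk, hej, hje, hkj⟩
  · intro hp
    obtain ⟨e, he, k, hkl, j, hjk, hej, hje, hkj⟩ := hp
    have hj : j < sigma.length := by omega
    have hk : k < sigma.length := hkl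
    have hje' : gd sigma j < gd sigma e := hje
    have hkj' : gd sigma k < gd sigma j := hkj
    obtain ⟨e', he'e, hsp', hge'⟩ := argmax_prefix sigma e he
    by_cases hstop : ∃ m, 0 < m ∧ m ≤ e' ∧ gd sigma m = 0 ∧ SPMax sigma m
    · -- the chain hits the pivot value 0 before e'; ¬ D_ then gives an early pattern
      obtain ⟨m, hm0, hme, hmz, hspm⟩ := hstop
      have hneg : ∀ t, t < m → gd sigma t < 0 := by
        intro t ht
        have := hspm.2 t ht
        omega
      have hnL : negLen sigma = m := negLen_eq_of_zero_spmax hm0 hspm.1 hmz hneg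
      have hearly : ∃ e2 < negLen sigma, pat3 sigma e2 := by
        by_contra hno
        exact hnd ⟨by omega, by
            rw [hnL, List.getElem?_eq_getElem hspm.1, ← gd_eq_getElem hspm.1, hmz],
          ⟨e, he, k, hkl, j, hjk, hej, hje, hkj⟩, hno⟩
      obtain ⟨e2, he2, k2, hk2l, j2, hj2k, he2j, hje2, hkj2⟩ := hearly
      obtain ⟨e3, he3, hsp3, hge3⟩ := argmax_prefix sigma e2 (by omega)
      have hje2' : gd sigma j2 < gd sigma e2 := hje2
      have hkj2' : gd sigma k2 < gd sigma j2 := hkj2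
      refine ⟨e3, by omega, hsp3, ?_, j2, by omega, k2, hj2k, hk2l, by omega, hkj2'⟩
      intro m' hm'0 hm'e hm'z _
      have : gd sigma m' < 0 := hneg m' (by omega)
      omega
    · push_neg at hstop
      refine ⟨e', by omega, hsp', ?_, j, by omega, k, hjk, hkl, by omega, hkj'⟩
      intro m hm0 hme hmz hspm
      have := hstop m hm0 hme hmz
      exact this hspm

theorem specFrom_false_of_D {sigma : List Int} (hd : D_is_321 sigma) : ¬ SpecFrom sigma 0 := by
  obtain ⟨h1, h2, h3, h4⟩ := hd
  have hmlen : negLen sigma < sigma.length := by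
    by_contra hc
    rw [List.getElem?_eq_none (by omega)] at h2
    simp at h2
  have hmz : gd sigma (negLen sigma) = 0 := by
    rw [List.getElem?_eq_getElem hmlen] at h2
    rw [gd_eq_getElem hmlen]
    exact Option.some.inj h2
  have hspm : SPMax sigma (negLen sigma) := by
    refine ⟨hmlen, fun t ht => ?_⟩
    have := gd_neg_of_lt_negLen ht
    omega
  rintro ⟨e, _, hsp, hnostop, j, hej, k, hjk, hk, hje, hkj⟩
  rcases Nat.lt_or_ge e (negLen sigma) with he | he
  · exact h4 ⟨e, he, k, hk, j, hjk, hej, hje, hkj⟩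
  · exact hnostop (negLen sigma) (by omega) he hmz hspm

-- ===== VERDICT (by name: the statement is the Claim_ definition above) =====
theorem is_321_spec : Claim_unchanged_is_321 := by
  intro sigma _ hpre hnd
  have hiff : is_321 sigma = true ↔ is_321_alt sigma = true := by
    rw [is_321_iff hpre, is_321_alt_iff, specFrom_iff_hasPat hnd]
  exact Bool.eq_iff_iff.mpr hiff

theorem is_321_changed : Claim_changed_is_321 := by
  unfold Claim_changed_is_321; decide

theorem is_321_tight : Claim_exact_is_321 := by
  intro sigma _ hpre hd
  have ha : is_321 sigma = false := by
    rcases Bool.eq_false_or_eq_true (is_321 sigma) with h | h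
    · exact absurd ((is_321_iff hpre).1 h) (specFrom_false_of_D hd)
    · exact h
  have hb : is_321_alt sigma = true := (is_321_alt_iff sigma).2 hd.2.2.1
  rw [ha, hb]
  simp
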